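-- pv_equiv track=rewrite | github.com/Anon3605/CSE220 | Lab_01/Task_03.py | shiftRight
-- ===== SOURCE A (Python) =====
-- def shiftRight(source,r):
--     temp=-1
--     for i in range(r):
--         for j in range(len(source)-1,temp,-1):
--             source[j]=source[j-1]
--         source[temp+1]=0
--         temp+=1
--     return source
--
-- source=[10,20,30,40,50,60]
-- ===== SOURCE B (Python) =====
-- def shiftRight(source, r):
--     # Single-pass rebuild instead of r one-step shift passes (same in-place mutation).
--     if r <= 0:
--         return source
--     n = len(source)
--     source[:] = [0] * r + source[: n - r]
--     return source
-- ===== Notes on version B (the rewrite author's own statement) =====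
-- stated objective: faster
-- what changed: Replaces r successive one-step shift passes (each an inner backward loop over the whole array) with a single slice rebuild [0]*r + source[:n-r], done once.
import Mathlib
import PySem

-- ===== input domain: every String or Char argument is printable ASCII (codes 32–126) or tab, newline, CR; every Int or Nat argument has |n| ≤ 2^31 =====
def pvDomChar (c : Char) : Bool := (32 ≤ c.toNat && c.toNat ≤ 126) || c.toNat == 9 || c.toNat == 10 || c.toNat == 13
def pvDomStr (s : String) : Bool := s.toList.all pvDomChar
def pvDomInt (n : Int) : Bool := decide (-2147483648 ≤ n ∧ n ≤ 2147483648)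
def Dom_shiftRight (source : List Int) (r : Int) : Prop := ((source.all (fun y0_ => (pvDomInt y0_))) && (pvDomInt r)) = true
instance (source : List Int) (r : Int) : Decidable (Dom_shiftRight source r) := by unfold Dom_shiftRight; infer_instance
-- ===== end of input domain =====

-- B replaces A's r one-step shift passes with a single slice rebuild [0]*r + source[:n-r]
-- (objective: faster). Both Pythons mutate `source` in place identically on Pre_; the
-- theorems here are about the returned value.

-- ===== PORT A =====
-- one outer-loop step: inner backward shift `source[j] = source[j-1]`, then `source[temp+1] = 0`
def shiftRightStep (st : List Int × Int) : List Int × Int :=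
  let src := (PySem.List.pyRange ((st.1.length : Int) - 1) st.2 (-1)).foldl
    (fun s j => PySem.List.pySetD s j (PySem.List.pyGetD s (j - 1) 0)) st.1
  (PySem.List.pySetD src (st.2 + 1) 0, st.2 + 1)

def shiftRight (source : List Int) (r : Int) : List Int :=
  ((PySem.List.pyRange 0 r 1).foldl (fun st _ => shiftRightStep st) (source, -1)).1

-- ===== PORT B =====
def shiftRight_alt (source : List Int) (r : Int) : List Int :=
  if r ≤ 0 then source
  else List.replicate r.toNat 0 ++
    PySem.List.slice source none (some ((source.length : Int) - r))

-- ===== PRECONDITION & SPEC =====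
-- A raises IndexError (write `source[temp+1] = 0` past the end) exactly when r > len(source).
def Pre_shiftRight (source : List Int) (r : Int) : Prop := r ≤ (source.length : Int)
instance (source : List Int) (r : Int) : Decidable (Pre_shiftRight source r) := by
  unfold Pre_shiftRight; infer_instance
def pvWitness_shiftRight : List Int × Int := ([10, 20, 30, 40, 50, 60], 2)

def Spec_shiftRight (source : List Int) (r : Int) (out : List Int) : Prop := out = shiftRight_alt source r
instance (source : List Int) (r : Int) (out : List Int) : Decidable (Spec_shiftRight source r out) := by unfold Spec_shiftRight; infer_instance

-- ===== CLAIM (what is proved, stated in full; the proofs are below) =====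
def Claim_equal_shiftRight : Prop := ∀ (source : List Int) (r : Int), Dom_shiftRight source r → Pre_shiftRight source r → Spec_shiftRight source r (shiftRight source r)

-- ===== LEMMAS AND PROOFS =====

-- The inner backward pass over j = m, m-1, …, i copies each cell from its left neighbour:
-- all cells below i and above m keep their values, cells i+1..m receive s[i..m-1], and cell i
-- receives SOME value w (for i = 0 this read wraps around; w is overwritten by 0 right after).
lemma inner_shift (i : Nat) : ∀ (m : Nat) (s : List Int), m < s.length → i ≤ m →
    ∃ w, (PySem.List.pyRange (m : Int) ((i : Int) - 1) (-1)).foldl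
        (fun s j => PySem.List.pySetD s j (PySem.List.pyGetD s (j - 1) 0)) s
      = s.take i ++ w :: ((s.drop i).take (m - i)) ++ s.drop (m + 1) := by
  intro m
  induction m with
  | zero =>
    intro s hm hi
    interval_cases i
    rw [PySem.List.pyRange_neg_one_cons (by omega)]
    rw [PySem.List.pyRange_neg_one_eq_nil (by omega)]
    refine ⟨PySem.List.pyGetD s (0 - 1) 0, ?_⟩
    simp only [List.foldl_cons, List.foldl_nil]
    have h0 : (0 : Int) = ((0 : Nat) : Int) := by norm_num
    rw [h0, PySem.List.pySetD_natCast]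
    rw [List.set_eq_take_cons_drop _ hm]
    simp
  | succ m ih =>
    intro s hm hi
    rw [PySem.List.pyRange_neg_one_cons (by omega)]
    simp only [List.foldl_cons]
    -- first write: s1 = s.set (m+1) s[m]
    have hcast : ((m + 1 : Nat) : Int) - 1 = ((m : Nat) : Int) := by push_cast; ring
    have hm' : m < s.length := by omega
    have hs1 : PySem.List.pySetD s ((m + 1 : Nat) : Int)
        (PySem.List.pyGetD s ((m : Nat) : Int) 0) = s.set (m + 1) s[m] := by
      rw [PySem.List.pyGetD_natCast, PySem.List.pySetD_natCast, List.getD_eq_getElem _ _ hm']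
    rcases Nat.eq_or_lt_of_le hi with hieq | hilt
    · -- i = m+1 : remaining range is empty
      subst hieq
      rw [hcast, PySem.List.pyRange_neg_one_eq_nil (by omega)]
      simp only [List.foldl_nil]
      refine ⟨s[m], ?_⟩
      rw [hs1, List.set_eq_take_cons_drop _ hm]
      simp
    · -- i ≤ m : recurse on the rest of the range with the updated list
      have hi' : i ≤ m := by omega
      rw [hcast, hs1]
      obtain ⟨w, hw⟩ := ih (s.set (m + 1) s[m]) (by simp; omega) hi'
      refine ⟨w, ?_⟩
      rw [hw]
      have htake : (s.set (m + 1) s[m]).take i = s.take i :=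
        List.take_set_of_le (by omega)
      have hdrop1 : ((s.set (m + 1) s[m]).drop i).take (m - i)
          = (s.drop i).take (m - i) := by
        rw [List.drop_set]
        rw [if_neg (by omega)]
        rw [List.take_set_of_le (by omega)]
      have hdropm : (s.set (m + 1) s[m]).drop (m + 1) = s[m] :: s.drop (m + 2) := by
        rw [List.drop_set, if_neg (by omega)]
        have h0 : m + 1 - (m + 1) = 0 := by omega
        rw [h0, List.drop_eq_getElem_cons hm, List.set_cons_zero]
      rw [htake, hdrop1, hdropm]
      have hseg : (s.drop i).take (m + 1 - i) = (s.drop i).take (m - i) ++ [s[m]] := by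
        have hlen : m - i < (s.drop i).length := by simp [List.length_drop]; omega
        have : m + 1 - i = (m - i) + 1 := by omega
        rw [this, List.take_succ_eq_append_getElem hlen]
        congr 1
        simp [List.getElem_drop]
        congr 1
        omega
      rw [hseg]
      simp

-- One full outer iteration, starting from the invariant state
-- (replicate i 0 ++ source.take (n-i), i-1), yields the state for i+1.
lemma outer_step (source : List Int) (i : Nat) (hi : i < source.length) :
    shiftRightStep (List.replicate i 0 ++ source.take (source.length - i), (i : Int) - 1)
      = (List.replicate (i + 1) 0 ++ source.take (source.length - (i + 1)), ((i + 1 : Nat) : Int) - 1) := by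
  set n := source.length with hn
  have hslen : (List.replicate i 0 ++ source.take (n - i)).length = n := by
    simp [List.length_replicate, List.length_take]; omega
  unfold shiftRightStep
  simp only
  have hm : n - 1 < (List.replicate i 0 ++ source.take (n - i)).length := by omega
  have hrange : ((List.replicate i 0 ++ source.take (n - i)).length : Int) - 1
      = ((n - 1 : Nat) : Int) := by rw [hslen]; omega
  obtain ⟨w, hw⟩ := inner_shift i (n - 1) (List.replicate i 0 ++ source.take (n - i)) hm (by omega)
  rw [hrange, hw]
  have hidx : (i : Int) - 1 + 1 = ((i : Nat) : Int) := by ring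
  rw [hidx, PySem.List.pySetD_natCast]
  simp only [Prod.mk.injEq]
  refine ⟨?_, ?_⟩
  · -- the written list
    have htake : (List.replicate i 0 ++ source.take (n - i)).take i = List.replicate i 0 := by
      simp [List.length_replicate]
    have hdropi : (List.replicate i 0 ++ source.take (n - i)).drop i = source.take (n - i) := by
      simp [List.length_replicate]
    have hdropn : (List.replicate i 0 ++ source.take (n - i)).drop (n - 1 + 1) = [] := by
      apply List.drop_eq_nil_of_le; omega
    rw [htake, hdropi, hdropn, List.append_nil]
    have hseg : (source.take (n - i)).take (n - 1 - i) = source.take (n - (i + 1)) := by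
      rw [List.take_take]
      congr 1
      omega
    rw [hseg]
    have hset : (List.replicate i 0 ++ w :: source.take (n - (i + 1))).set i 0
        = List.replicate i 0 ++ 0 :: source.take (n - (i + 1)) := by
      rw [List.set_append_right _ _ (by simp)]
      simp
    rw [hset, List.replicate_succ', List.append_assoc]
    simp
  · push_cast; ring

-- Folding the outer loop body over any list of length k preserves the invariant.
lemma outer_fold (source : List Int) : ∀ (l : List Int) (i : Nat),
    i + l.length ≤ source.length →
    l.foldl (fun st _ => shiftRightStep st)
        (List.replicate i 0 ++ source.take (source.length - i), (i : Int) - 1)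
      = (List.replicate (i + l.length) 0 ++ source.take (source.length - (i + l.length)),
          ((i + l.length : Nat) : Int) - 1) := by
  intro l
  induction l with
  | nil => intro i h; simp
  | cons x xs ih =>
    intro i h
    simp only [List.length_cons] at h ⊢
    simp only [List.foldl_cons]
    rw [outer_step source i (by omega)]
    rw [ih (i + 1) (by omega)]
    simp only [Prod.mk.injEq]
    refine ⟨?_, ?_⟩
    · congr 2 <;> omega
    · push_cast; ring

-- ===== VERDICT (by name: the statement is the Claim_ definition above) =====
theorem shiftRight_spec : Claim_equal_shiftRight := by
  intro source r _hdom hpre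
  unfold Spec_shiftRight shiftRight shiftRight_alt
  by_cases hr : r ≤ 0
  · rw [if_pos hr, PySem.List.pyRange_one_eq_nil hr]
    simp
  · rw [if_neg hr]
    have hk : r = ((r.toNat : Nat) : Int) := by omega
    have hkn : r.toNat ≤ source.length := by
      unfold Pre_shiftRight at hpre; omega
    have hlen : (PySem.List.pyRange 0 r 1).length = r.toNat := by
      rw [PySem.List.length_pyRange_one]; omega
    have hinit : (source, (-1 : Int))
        = (List.replicate 0 0 ++ source.take (source.length - 0), ((0 : Nat) : Int) - 1) := by
      simp
    rw [hinit, outer_fold source (PySem.List.pyRange 0 r 1) 0 (by omega), hlen]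
    simp only [Nat.zero_add]
    have hb : ((source.length : Int) - r) = ((source.length - r.toNat : Nat) : Int) := by
      omega
    rw [hb, PySem.List.slice_to_natCast]
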